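-- pv_equiv track=rewrite | github.com/andremsouza/patsa-bil | imagelog_ai/utils/argcheck.py | same_extension
-- ===== SOURCE A (Python) =====
-- from typing import Any, Sequence, Tuple, Type, TypeVar, Union, List
--
-- def same_extension(list_of_paths: List[str]) -> Any:
--     """Check if a list of files have the same extension.
--
--     Parameters
--     ----------
--     list_of_paths : List[str]
--         List of file paths.
--     """
--
--     extensions = list(set([path.split(".")[-1] for path in list_of_paths]))
--
--     if len(extensions) > 1:
--         raise TypeError(
--             f"Files do not have the same extension. Extensions: [{extensions}]"
--         )
--     else:
--         return extensions[0]
-- ===== SOURCE B (Python) =====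
-- from typing import Any, List
--
-- def same_extension(list_of_paths: List[str]) -> Any:
--     """Check if a list of files have the same extension."""
--     ref = list_of_paths[0].split(".")[-1]
--     for path in list_of_paths:
--         if path.split(".")[-1] != ref:
--             extensions = list(set(path.split(".")[-1] for path in list_of_paths))
--             raise TypeError(
--                 f"Files do not have the same extension. Extensions: [{extensions}]"
--             )
--     return ref
-- ===== Notes on version B (the rewrite author's own statement) =====
-- stated objective: alternative
-- what changed: B holds the first path's extension as a reference and compares each path to it with an early exit, instead of materialising the deduplicated set of all extensions and counting it; the set is only built in the error path.
import Mathlib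
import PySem

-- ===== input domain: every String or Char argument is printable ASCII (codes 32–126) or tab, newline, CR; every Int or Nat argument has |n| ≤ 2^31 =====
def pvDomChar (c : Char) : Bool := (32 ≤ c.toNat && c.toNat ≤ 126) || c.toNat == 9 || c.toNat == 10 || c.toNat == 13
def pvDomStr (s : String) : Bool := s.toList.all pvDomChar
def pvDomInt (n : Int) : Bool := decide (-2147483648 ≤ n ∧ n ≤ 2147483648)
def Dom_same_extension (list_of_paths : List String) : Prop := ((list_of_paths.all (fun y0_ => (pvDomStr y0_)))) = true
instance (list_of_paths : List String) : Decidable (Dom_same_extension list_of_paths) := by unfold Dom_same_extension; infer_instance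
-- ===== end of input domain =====

-- B replaces A's build-the-set-of-all-extensions-and-count strategy by a hold-first-extension,
-- compare-each, early-exit loop (the set is only built in the error path). Objective: alternative.


-- ===== PORT A =====
-- path.split(".")[-1]; split of a nonempty separator always yields a nonempty list,
-- so Python's [-1] never fails; the .getD "" default is unreachable.
def pvExtA (path : String) : String :=
  (PySem.List.pyGet? ((PySem.Str.split? path ".").getD []) (-1)).getD ""

def same_extension (list_of_paths : List String) : String :=
  let extensions := PySem.Set.ofList (list_of_paths.map pvExtA)
  if extensions.length > 1 then
    ""  -- raise TypeError (outside Pre_)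
  else
    (PySem.List.pyGet? extensions 0).getD ""  -- extensions[0]; IndexError on [] is outside Pre_

-- ===== PORT B =====
def pvExtB (path : String) : String :=
  (PySem.List.pyGet? ((PySem.Str.split? path ".").getD []) (-1)).getD ""

-- the for-loop of B: first mismatching path raises (outside Pre_), else fall through to ref
def pvLoopB (ref : String) : List String → String
  | [] => ref
  | path :: rest => if pvExtB path ≠ ref then "" else pvLoopB ref rest

def same_extension_alt (list_of_paths : List String) : String :=
  match list_of_paths with
  | [] => ""  -- list_of_paths[0] raises IndexError (outside Pre_)
  | p :: _ => pvLoopB (pvExtB p) list_of_paths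

-- ===== PRECONDITION & SPEC =====
-- Pre_ excludes exactly the inputs where A raises: the empty list (IndexError on extensions[0])
-- and lists with two distinct extensions (explicit TypeError).
def pvExtP (path : String) : String :=
  (PySem.List.pyGet? ((PySem.Str.split? path ".").getD []) (-1)).getD ""

def Pre_same_extension (list_of_paths : List String) : Prop :=
  list_of_paths ≠ [] ∧
  ∀ p ∈ list_of_paths, pvExtP p = pvExtP list_of_paths.headI

instance (list_of_paths : List String) : Decidable (Pre_same_extension list_of_paths) := by
  unfold Pre_same_extension; infer_instance

def pvWitness_same_extension : List String := ["a.png", "b.png"]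

def Spec_same_extension (list_of_paths : List String) (out : String) : Prop := out = same_extension_alt list_of_paths
instance (list_of_paths : List String) (out : String) : Decidable (Spec_same_extension list_of_paths out) := by unfold Spec_same_extension; infer_instance

-- ===== CLAIM (what is proved, stated in full; the proofs are below) =====
def Claim_equal_same_extension : Prop := ∀ (list_of_paths : List String), Dom_same_extension list_of_paths → Pre_same_extension list_of_paths → Spec_same_extension list_of_paths (same_extension list_of_paths)

-- ===== LEMMAS AND PROOFS =====

-- set(xs) of a nonempty constant-valued list is the singleton [c]
theorem pv_foldl_add_const {c : String} :
    ∀ (xs : List String), (∀ x ∈ xs, x = c) → xs.foldl PySem.Set.add [c] = [c] := by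
  intro xs
  induction xs with
  | nil => intro _; rfl
  | cons y ys ih =>
    intro h
    have hy : y = c := h y (by simp)
    simp only [List.foldl, hy]
    have : PySem.Set.add [c] c = [c] := by simp [PySem.Set.add, PySem.Set.contains]
    rw [this]
    exact ih (fun x hx => h x (by simp [hx]))

theorem pv_ofList_const {c : String} (xs : List String) (hne : xs ≠ [])
    (h : ∀ x ∈ xs, x = c) : PySem.Set.ofList xs = [c] := by
  cases xs with
  | nil => exact absurd rfl hne
  | cons y ys =>
    have hy : y = c := h y (by simp)
    rw [PySem.Set.ofList_eq_foldl]
    simp only [List.foldl, hy]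
    have h0 : PySem.Set.add ([] : PySem.Set String) c = [c] := by
      simp [PySem.Set.add, PySem.Set.contains]
    rw [h0]
    exact pv_foldl_add_const ys (fun x hx => h x (by simp [hx]))

theorem pv_loopB_const (ref : String) :
    ∀ (xs : List String), (∀ p ∈ xs, pvExtB p = ref) → pvLoopB ref xs = ref := by
  intro xs
  induction xs with
  | nil => intro _; rfl
  | cons y ys ih =>
    intro h
    have hy : pvExtB y = ref := h y (by simp)
    simp [pvLoopB, hy]
    exact ih (fun p hp => h p (by simp [hp]))

-- ===== VERDICT (by name: the statement is the Claim_ definition above) =====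
theorem same_extension_spec : Claim_equal_same_extension := by
  intro list_of_paths _ hpre
  obtain ⟨hne, hall⟩ := hpre
  cases list_of_paths with
  | nil => exact absurd rfl hne
  | cons p rest =>
    have hext : ∀ x ∈ (p :: rest).map pvExtA, x = pvExtP p := by
      intro x hx
      simp only [List.mem_map] at hx
      obtain ⟨q, hq, rfl⟩ := hx
      have := hall q hq
      simpa [pvExtA, pvExtP] using this
    have hset : PySem.Set.ofList ((p :: rest).map pvExtA) = [pvExtP p] :=
      pv_ofList_const _ (by simp) hext
    have hA : same_extension (p :: rest) = pvExtP p := by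
      simp only [same_extension, hset]
      rfl
    have hB : same_extension_alt (p :: rest) = pvExtP p := by
      have hrefp : pvExtB p = pvExtP p := rfl
      simp only [same_extension_alt, hrefp]
      exact pv_loopB_const _ _ (fun q hq => by
        simpa [pvExtB, pvExtP] using hall q hq)
    unfold Spec_same_extension
    rw [hA, hB]
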